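-- pv_equiv track=rewrite | github.com/unrii/HSE_Algorithm | A_v05112024.py | long_sub
-- ===== SOURCE A (Python) =====
-- def long_sub(arr):
--     n = len(arr)
--     if n == 0:
--         return []
--
--     dp = [1] * n
--     prev_index = [-1] * n
--
--     for i in range(1, n):
--         for j in range(i):
--             if ((arr[j] < arr[i] and (j == 0 or arr[j-1] > arr[j]))
--                 or (arr[j] > arr[i] and (j == 0 or arr[j-1] < arr[j]))) and dp[j] + 1 > dp[i]:
--                 dp[i] = dp[j] + 1
--                 prev_index[i] = j
--
--     max_index = 0
--     for i in range(1, n):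
--         if dp[i] > dp[max_index]:
--             max_index = i
--
--     result = []
--     while max_index != -1:
--         result.append(arr[max_index])
--         max_index = prev_index[max_index]
--
--     result.reverse()
--     return result
-- ===== SOURCE B (Python) =====
-- def long_sub(arr):
--     n = len(arr)
--     if n == 0:
--         return []
--
--     # combine two optional (dp, index) candidates: higher dp wins, ties -> smaller index
--     def combine(a, b):
--         if a is None:
--             return b
--         if b is None:
--             return a
--         if b[0] > a[0] or (b[0] == a[0] and b[1] < a[1]):
--             return b
--         return a
--
--     # balanced search tree over the distinct values, as nested tuples
--     # leaf: ('L', value, best) ; node: ('N', split, left, right, best)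
--     def build(vals):
--         if len(vals) == 1:
--             return ('L', vals[0], None)
--         k = len(vals) // 2
--         return ('N', vals[k-1], build(vals[:k]), build(vals[k:]), None)
--
--     def best(t):
--         return t[2] if t[0] == 'L' else t[4]
--
--     def update(t, v, cand):
--         if t[0] == 'L':
--             return ('L', t[1], combine(t[2], cand))
--         _, s, l, r, b = t
--         if v <= s:
--             return ('N', s, update(l, v, cand), r, combine(b, cand))
--         return ('N', s, l, update(r, v, cand), combine(b, cand))
--
--     def query_lt(t, x):
--         if t[0] == 'L':
--             return t[2] if t[1] < x else None
--         _, s, l, r, _ = t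
--         if s < x:
--             return combine(best(l), query_lt(r, x))
--         return query_lt(l, x)
--
--     def query_gt(t, x):
--         if t[0] == 'L':
--             return t[2] if t[1] > x else None
--         _, s, l, r, _ = t
--         if x < s:
--             return combine(query_gt(l, x), best(r))
--         return query_gt(r, x)
--
--     vals = sorted(set(arr))
--     tv = build(vals)   # candidates that start a rise (index 0 or a strict local drop)
--     tp = build(vals)   # candidates that start a fall (index 0 or a strict local rise)
--     dp = [1] * n
--     prev_index = [-1] * n
--     for i in range(n):
--         if i > 0:
--             b = combine(query_lt(tv, arr[i]), query_gt(tp, arr[i]))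
--             if b is not None:
--                 dp[i] = b[0] + 1
--                 prev_index[i] = b[1]
--         if i == 0 or arr[i-1] > arr[i]:
--             tv = update(tv, arr[i], (dp[i], i))
--         if i == 0 or arr[i-1] < arr[i]:
--             tp = update(tp, arr[i], (dp[i], i))
--
--     max_index = 0
--     for i in range(1, n):
--         if dp[i] > dp[max_index]:
--             max_index = i
--
--     result = []
--     while max_index != -1:
--         result.append(arr[max_index])
--         max_index = prev_index[max_index]
--
--     result.reverse()
--     return result
-- ===== Notes on version B (the rewrite author's own statement) =====
-- stated objective: faster
-- what changed: The O(n^2) inner scan over all previous indices is replaced by two balanced value-indexed trees (one for rise-starting positions, one for fall-starting positions) storing (max dp, min index), queried for range maxima below/above arr[i]; dp/prev then drive the same reconstruction.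
import Mathlib
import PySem

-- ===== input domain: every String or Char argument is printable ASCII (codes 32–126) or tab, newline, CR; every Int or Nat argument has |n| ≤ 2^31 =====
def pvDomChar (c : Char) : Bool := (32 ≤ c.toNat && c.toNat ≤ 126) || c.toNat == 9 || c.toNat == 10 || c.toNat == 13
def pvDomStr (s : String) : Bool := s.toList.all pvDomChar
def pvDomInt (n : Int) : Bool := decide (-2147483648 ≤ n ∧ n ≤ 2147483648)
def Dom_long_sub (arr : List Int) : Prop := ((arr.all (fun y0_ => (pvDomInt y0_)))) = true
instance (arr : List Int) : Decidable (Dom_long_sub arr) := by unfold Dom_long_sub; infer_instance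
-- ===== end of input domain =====

-- B replaces A's quadratic inner scan by two balanced value-indexed trees holding (max dp, min index);
-- objective: faster (O(n log n) instead of O(n^2)). Tail (best-end scan and chain reconstruction) is shared.

-- ===== SHARED TAIL HELPERS (identical tail code in both Pythons) =====

-- 'for i in range(1, n): if dp[i] > dp[max_index]: max_index = i'
def maxIdxLoop (dp : List Int) (n : Nat) : Nat :=
  (List.range' 1 (n - 1)).foldl (fun m i => if dp.getD i 0 > dp.getD m 0 then i else m) 0

-- 'while max_index != -1: result.append(arr[max_index]); max_index = prev_index[max_index]; result.reverse()'
-- fuel n+1 suffices: the prev chain strictly decreases, so it has at most n steps before -1.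
def reconLoop (arr pr : List Int) : Nat → Int → List Int → List Int
  | 0, _, acc => acc.reverse
  | fuel + 1, mi, acc =>
    if mi = -1 then acc.reverse
    else reconLoop arr pr fuel (pr.getD mi.toNat 0) (acc ++ [arr.getD mi.toNat 0])

-- ===== PORT A =====

-- the inner 'for j in range(i)' of A
def innerA (arr : List Int) (i : Nat) (st : List Int × List Int) : List Int × List Int :=
  (List.range i).foldl (fun st j =>
    if ((decide (arr.getD j 0 < arr.getD i 0) && (j == 0 || decide (arr.getD (j-1) 0 > arr.getD j 0))) ||
        (decide (arr.getD j 0 > arr.getD i 0) && (j == 0 || decide (arr.getD (j-1) 0 < arr.getD j 0)))) &&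
       decide (st.1.getD j 0 + 1 > st.1.getD i 0)
    then (st.1.set i (st.1.getD j 0 + 1), st.2.set i (Int.ofNat j))
    else st) st

def long_sub (arr : List Int) : List Int :=
  let n := arr.length
  if n = 0 then []
  else
    let st := (List.range' 1 (n - 1)).foldl (fun st i => innerA arr i st)
                (List.replicate n 1, List.replicate n (-1))
    reconLoop arr st.2 (n + 1) (Int.ofNat (maxIdxLoop st.1 n)) []

-- ===== PORT B =====

-- optional (dp, index) candidates; higher dp wins, ties -> smaller index
def lsCombine (a b : Option (Int × Int)) : Option (Int × Int) :=
  match a, b with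
  | none, b => b
  | a, none => a
  | some (d1, i1), some (d2, i2) =>
    if decide (d2 > d1) || (d2 == d1 && decide (i2 < i1)) then some (d2, i2) else some (d1, i1)

-- leaf value best | node split left right best
inductive LSTree where
  | leaf : Int → Option (Int × Int) → LSTree
  | node : Int → LSTree → LSTree → Option (Int × Int) → LSTree

def lsBest : LSTree → Option (Int × Int)
  | .leaf _ b => b
  | .node _ _ _ b => b

def lsBuild (vs : List Int) : LSTree :=
  match vs with
  | [] => .leaf 0 none          -- never reached: built only from a nonempty value list
  | [v] => .leaf v none
  | v0 :: v1 :: tl =>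
    let l := v0 :: v1 :: tl
    let k := l.length / 2
    .node (l.getD (k - 1) 0) (lsBuild (l.take k)) (lsBuild (l.drop k)) none
termination_by vs.length
decreasing_by
  · simp [List.length_take]; omega
  · simp; omega

def lsUpdate : LSTree → Int → Int × Int → LSTree
  | .leaf v b, _, c => .leaf v (lsCombine b (some c))
  | .node s l r b, v, c =>
    if v ≤ s then .node s (lsUpdate l v c) r (lsCombine b (some c))
    else .node s l (lsUpdate r v c) (lsCombine b (some c))

def lsQueryLt : LSTree → Int → Option (Int × Int)
  | .leaf v b, x => if v < x then b else none
  | .node s l r _, x => if s < x then lsCombine (lsBest l) (lsQueryLt r x) else lsQueryLt l x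

def lsQueryGt : LSTree → Int → Option (Int × Int)
  | .leaf v b, x => if v > x then b else none
  | .node s l r _, x => if x < s then lsCombine (lsQueryGt l x) (lsBest r) else lsQueryGt r x

-- one iteration of B's single 'for i in range(n)' loop
def stepB (arr : List Int) (st : (List Int × List Int) × (LSTree × LSTree)) (i : Nat) :
    (List Int × List Int) × (LSTree × LSTree) :=
  let dppr :=
    if i = 0 then st.1
    else
      match lsCombine (lsQueryLt st.2.1 (arr.getD i 0)) (lsQueryGt st.2.2 (arr.getD i 0)) with
      | none => st.1
      | some (d, j) => (st.1.1.set i (d + 1), st.1.2.set i j)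
  let tv := if i == 0 || decide (arr.getD (i-1) 0 > arr.getD i 0)
            then lsUpdate st.2.1 (arr.getD i 0) (dppr.1.getD i 0, Int.ofNat i) else st.2.1
  let tp := if i == 0 || decide (arr.getD (i-1) 0 < arr.getD i 0)
            then lsUpdate st.2.2 (arr.getD i 0) (dppr.1.getD i 0, Int.ofNat i) else st.2.2
  (dppr, (tv, tp))

def long_sub_alt (arr : List Int) : List Int :=
  let n := arr.length
  if n = 0 then []
  else
    let vals := PySem.List.sorted (PySem.Set.ofList arr) (fun x => x) false
    let t0 := lsBuild vals
    let st := (List.range n).foldl (stepB arr)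
                ((List.replicate n 1, List.replicate n (-1)), (t0, t0))
    reconLoop arr st.1.2 (n + 1) (Int.ofNat (maxIdxLoop st.1.1 n)) []

-- ===== PRECONDITION & SPEC =====
def Spec_long_sub (arr : List Int) (out : List Int) : Prop := out = long_sub_alt arr
instance (arr : List Int) (out : List Int) : Decidable (Spec_long_sub arr out) := by unfold Spec_long_sub; infer_instance

-- ===== CLAIM (what is proved, stated in full; the proofs are below) =====
def Claim_equal_long_sub : Prop := ∀ (arr : List Int), Dom_long_sub arr → Spec_long_sub arr (long_sub arr)

-- ===== LEMMAS AND PROOFS =====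

-- ---- generic facts about lsCombine / bestOf ----

def bestOf (l : List (Int × Int)) : Option (Int × Int) :=
  l.foldl (fun b c => lsCombine b (some c)) none

theorem lsCombine_none_right (a : Option (Int × Int)) : lsCombine a none = a := by
  cases a <;> rfl

theorem lsCombine_comm (a b : Option (Int × Int)) : lsCombine a b = lsCombine b a := by
  rcases a with _ | ⟨d1, i1⟩ <;> rcases b with _ | ⟨d2, i2⟩ <;> simp [lsCombine]
  split_ifs with h1 h2 h2 <;> simp_all <;> constructor <;> omega

theorem lsCombine_assoc (a b c : Option (Int × Int)) :
    lsCombine (lsCombine a b) c = lsCombine a (lsCombine b c) := by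
  rcases a with _ | ⟨d1, i1⟩ <;> rcases b with _ | ⟨d2, i2⟩ <;> rcases c with _ | ⟨d3, i3⟩ <;>
    simp only [lsCombine] <;> split_ifs <;> simp only [lsCombine] <;> split_ifs <;> simp_all <;>
      first | rfl | (constructor <;> omega) | omega

theorem foldl_lsCombine (l : List (Int × Int)) (b : Option (Int × Int)) :
    l.foldl (fun b c => lsCombine b (some c)) b = lsCombine b (bestOf l) := by
  induction l generalizing b with
  | nil => simp [bestOf, lsCombine_none_right]
  | cons x l ih =>
    simp only [bestOf, List.foldl_cons]
    rw [ih, ih (lsCombine none (some x)), ← lsCombine_assoc]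
    rfl

theorem bestOf_append (xs ys : List (Int × Int)) :
    bestOf (xs ++ ys) = lsCombine (bestOf xs) (bestOf ys) := by
  simp only [bestOf, List.foldl_append]
  rw [foldl_lsCombine]
  rfl

theorem bestOf_perm {xs ys : List (Int × Int)} (h : xs.Perm ys) : bestOf xs = bestOf ys := by
  unfold bestOf
  exact h.foldl_eq' (fun x _ y _ z => by
    rw [lsCombine_assoc, lsCombine_assoc, lsCombine_comm (some x) (some y)]) none

theorem foldl_if_filterMap {α : Type} (l : List α) (p : α → Bool) (g : α → Int × Int)
    (c : Option (Int × Int)) :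
    l.foldl (fun b j => if p j then lsCombine b (some (g j)) else b) c
      = (l.filterMap (fun j => if p j then some (g j) else none)).foldl
          (fun b c => lsCombine b (some c)) c := by
  induction l generalizing c with
  | nil => rfl
  | cons x l ih => by_cases h : p x <;> simp [h, ih]

theorem filterMap_disjoint_perm {α : Type} (l : List α) (p q : α → Bool) (g : α → Int × Int)
    (hdisj : ∀ j ∈ l, ¬(p j = true ∧ q j = true)) :
    (l.filterMap (fun j => if p j then some (g j) else if q j then some (g j) else none)).Perm
      (l.filterMap (fun j => if p j then some (g j) else none)
        ++ l.filterMap (fun j => if q j then some (g j) else none)) := by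
  induction l with
  | nil => simp
  | cons x l ih =>
    have hx := hdisj x (by simp)
    have ihl := ih (fun j hj => hdisj j (by simp [hj]))
    by_cases h1 : p x <;> by_cases h2 : q x <;> simp_all
    exact (ihl.cons (g x)).trans (List.perm_middle).symm

-- ---- tree semantics ----

def keysT : LSTree → List Int
  | .leaf v _ => [v]
  | .node _ l r _ => keysT l ++ keysT r

def allB : LSTree → Option (Int × Int)
  | .leaf _ b => b
  | .node _ l r _ => lsCombine (allB l) (allB r)

def bLt : LSTree → Int → Option (Int × Int)
  | .leaf v b, x => if v < x then b else none
  | .node _ l r _, x => lsCombine (bLt l x) (bLt r x)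

def bGt : LSTree → Int → Option (Int × Int)
  | .leaf v b, x => if x < v then b else none
  | .node _ l r _, x => lsCombine (bGt l x) (bGt r x)

theorem bLt_node (s : Int) (l r : LSTree) (b : Option (Int × Int)) (x : Int) :
    bLt (.node s l r b) x = lsCombine (bLt l x) (bLt r x) := rfl

theorem bGt_node (s : Int) (l r : LSTree) (b : Option (Int × Int)) (x : Int) :
    bGt (.node s l r b) x = lsCombine (bGt l x) (bGt r x) := rfl

def wfT : LSTree → Prop
  | .leaf _ _ => True
  | .node s l r b => (∀ k ∈ keysT l, k ≤ s) ∧ (∀ k ∈ keysT r, s < k) ∧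
      b = lsCombine (allB l) (allB r) ∧ wfT l ∧ wfT r

theorem lsBest_eq_allB {t : LSTree} (h : wfT t) : lsBest t = allB t := by
  cases t with
  | leaf v b => rfl
  | node s l r b => exact h.2.2.1

theorem bLt_eq_allB {t : LSTree} {x : Int} (h : ∀ k ∈ keysT t, k < x) : bLt t x = allB t := by
  induction t with
  | leaf v b => simp [bLt, allB, h v (by simp [keysT])]
  | node s l r b ihl ihr =>
    simp only [bLt, allB]
    rw [ihl (fun k hk => h k (by simp [keysT, hk])), ihr (fun k hk => h k (by simp [keysT, hk]))]

theorem bLt_eq_none {t : LSTree} {x : Int} (h : ∀ k ∈ keysT t, x ≤ k) : bLt t x = none := by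
  induction t with
  | leaf v b =>
    have := h v (by simp [keysT])
    simp [bLt]; omega
  | node s l r b ihl ihr =>
    simp only [bLt]
    rw [ihl (fun k hk => h k (by simp [keysT, hk])), ihr (fun k hk => h k (by simp [keysT, hk]))]
    rfl

theorem bGt_eq_allB {t : LSTree} {x : Int} (h : ∀ k ∈ keysT t, x < k) : bGt t x = allB t := by
  induction t with
  | leaf v b => simp [bGt, allB, h v (by simp [keysT])]
  | node s l r b ihl ihr =>
    simp only [bGt, allB]
    rw [ihl (fun k hk => h k (by simp [keysT, hk])), ihr (fun k hk => h k (by simp [keysT, hk]))]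

theorem bGt_eq_none {t : LSTree} {x : Int} (h : ∀ k ∈ keysT t, k ≤ x) : bGt t x = none := by
  induction t with
  | leaf v b =>
    have := h v (by simp [keysT])
    simp [bGt]; omega
  | node s l r b ihl ihr =>
    simp only [bGt]
    rw [ihl (fun k hk => h k (by simp [keysT, hk])), ihr (fun k hk => h k (by simp [keysT, hk]))]
    rfl

theorem lsQueryLt_eq_bLt {t : LSTree} (h : wfT t) (x : Int) : lsQueryLt t x = bLt t x := by
  induction t with
  | leaf v b => rfl
  | node s l r b ihl ihr =>
    obtain ⟨hls, hrs, hb, hwl, hwr⟩ := h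
    simp only [lsQueryLt, bLt]
    by_cases hsx : s < x
    · rw [if_pos hsx, lsBest_eq_allB hwl, ihr hwr,
        bLt_eq_allB (fun k hk => lt_of_le_of_lt (hls k hk) hsx)]
    · rw [if_neg hsx, ihl hwl,
        bLt_eq_none (t := r) (fun k hk => le_of_lt (lt_of_le_of_lt (by omega : x ≤ s) (hrs k hk))),
        lsCombine_none_right]

theorem lsQueryGt_eq_bGt {t : LSTree} (h : wfT t) (x : Int) : lsQueryGt t x = bGt t x := by
  induction t with
  | leaf v b => rfl
  | node s l r b ihl ihr =>
    obtain ⟨hls, hrs, hb, hwl, hwr⟩ := h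
    simp only [lsQueryGt, bGt]
    by_cases hxs : x < s
    · rw [if_pos hxs, lsBest_eq_allB hwr, ihl hwl,
        bGt_eq_allB (fun k hk => lt_trans hxs (hrs k hk))]
    · rw [if_neg hxs, ihr hwr,
        bGt_eq_none (t := l) (fun k hk => le_trans (hls k hk) (by omega : s ≤ x))]
      rfl

theorem lsUpdate_props {t : LSTree} (h : wfT t) {v : Int} (hv : v ∈ keysT t) (c : Int × Int) :
    keysT (lsUpdate t v c) = keysT t ∧ wfT (lsUpdate t v c) ∧
    allB (lsUpdate t v c) = lsCombine (allB t) (some c) ∧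
    (∀ x, bLt (lsUpdate t v c) x = if v < x then lsCombine (bLt t x) (some c) else bLt t x) ∧
    (∀ x, bGt (lsUpdate t v c) x = if x < v then lsCombine (bGt t x) (some c) else bGt t x) := by
  induction t with
  | leaf w b =>
    have hvw : v = w := by simpa [keysT] using hv
    subst hvw
    refine ⟨rfl, trivial, rfl, fun x => ?_, fun x => ?_⟩
    · by_cases hx : v < x <;> simp [lsUpdate, bLt, hx]
    · by_cases hx : x < v <;> simp [lsUpdate, bGt, hx]
  | node s l r b ihl ihr =>
    obtain ⟨hls, hrs, hb, hwl, hwr⟩ := h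
    by_cases hvs : v ≤ s
    · have hvl : v ∈ keysT l := by
        rcases (by simpa [keysT] using hv : v ∈ keysT l ∨ v ∈ keysT r) with h' | h'
        · exact h'
        · exact absurd (hrs v h') (by omega)
      obtain ⟨ik, iw, ia, ilt, igt⟩ := ihl hwl hvl
      have hdef : lsUpdate (LSTree.node s l r b) v c
          = LSTree.node s (lsUpdate l v c) r (lsCombine b (some c)) := by
        simp [lsUpdate, hvs]
      rw [hdef]
      refine ⟨?_, ?_, ?_, fun x => ?_, fun x => ?_⟩
      · simp [keysT, ik]
      · refine ⟨?_, hrs, ?_, iw, hwr⟩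
        · intro k hk; rw [ik] at hk; exact hls k hk
        · simp only [allB, ia, hb]
          rw [lsCombine_assoc, lsCombine_assoc, lsCombine_comm (some c) (allB r)]
      · simp only [allB, ia]
        rw [lsCombine_assoc, lsCombine_assoc, lsCombine_comm (some c) (allB r)]
      · simp only [bLt, ilt]
        by_cases hx : v < x <;> simp only [hx, if_pos, if_neg, if_true, if_false]
        rw [lsCombine_assoc, lsCombine_assoc, lsCombine_comm (some c) (bLt r x)]
      · simp only [bGt, igt]
        by_cases hx : x < v <;> simp only [hx, if_pos, if_neg, if_true, if_false]
        rw [lsCombine_assoc, lsCombine_assoc, lsCombine_comm (some c) (bGt r x)]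
    · have hvr : v ∈ keysT r := by
        rcases (by simpa [keysT] using hv : v ∈ keysT l ∨ v ∈ keysT r) with h' | h'
        · exact absurd (hls v h') (by omega)
        · exact h'
      obtain ⟨ik, iw, ia, ilt, igt⟩ := ihr hwr hvr
      have hdef : lsUpdate (LSTree.node s l r b) v c
          = LSTree.node s l (lsUpdate r v c) (lsCombine b (some c)) := by
        simp [lsUpdate, hvs]
      rw [hdef]
      refine ⟨?_, ?_, ?_, fun x => ?_, fun x => ?_⟩
      · simp [keysT, ik]
      · refine ⟨hls, ?_, ?_, hwl, iw⟩
        · intro k hk; rw [ik] at hk; exact hrs k hk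
        · simp only [allB, ia, hb, lsCombine_assoc]
      · simp only [allB, ia, lsCombine_assoc]
      · simp only [bLt, ilt]
        by_cases hx : v < x <;> simp only [hx, if_pos, if_neg, if_true, if_false, lsCombine_assoc]
      · simp only [bGt, igt]
        by_cases hx : x < v <;> simp only [hx, if_pos, if_neg, if_true, if_false, lsCombine_assoc]

theorem lsBuild_props (vs : List Int) (hp : vs.Pairwise (· < ·)) (hne : vs ≠ []) :
    keysT (lsBuild vs) = vs ∧ wfT (lsBuild vs) ∧ allB (lsBuild vs) = none ∧
    (∀ x, bLt (lsBuild vs) x = none) ∧ (∀ x, bGt (lsBuild vs) x = none) := by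
  match vs with
  | [] => exact absurd rfl hne
  | [v] =>
    have hdef : lsBuild [v] = LSTree.leaf v none := by rw [lsBuild]
    rw [hdef]
    exact ⟨rfl, trivial, rfl, fun x => by simp [bLt], fun x => by simp [bGt]⟩
  | v0 :: v1 :: tl =>
    set l : List Int := v0 :: v1 :: tl with hl
    have hlen : 2 ≤ l.length := by simp [hl]
    set k : Nat := l.length / 2 with hk
    have hk1 : 1 ≤ k := by omega
    have hkl : k < l.length := by omega
    have hdef : lsBuild l = LSTree.node (l.getD (k-1) 0) (lsBuild (l.take k)) (lsBuild (l.drop k)) none := by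
      rw [lsBuild]
    have hpt : (l.take k).Pairwise (· < ·) := hp.sublist (List.take_sublist k l)
    have hpd : (l.drop k).Pairwise (· < ·) := hp.sublist (List.drop_sublist k l)
    have hnt : l.take k ≠ [] := by
      intro h; have := congrArg List.length h; simp at this; omega
    have hnd : l.drop k ≠ [] := by
      intro h; have := congrArg List.length h; simp at this; omega
    obtain ⟨tk, tw, ta, tlt, tgt⟩ := lsBuild_props (l.take k) hpt hnt
    obtain ⟨dk, dw, da, dlt, dgt⟩ := lsBuild_props (l.drop k) hpd hnd
    have hget : l.getD (k-1) 0 = l[k-1]'(by omega) := List.getD_eq_getElem l 0 (by omega)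
    have hbl : ∀ y ∈ l.take k, y ≤ l.getD (k-1) 0 := by
      intro y hy
      obtain ⟨p, hp2, rfl⟩ := List.mem_iff_getElem.mp hy
      have hpk : p < k := by
        have := List.length_take_le k l; simp at hp2; omega
      rw [List.getElem_take, hget]
      rcases Nat.lt_or_ge p (k-1) with h' | h'
      · exact le_of_lt (List.pairwise_iff_getElem.mp hp p (k-1) (by omega) (by omega) (by omega))
      · have : p = k - 1 := by omega
        subst this; rfl
    have hbr : ∀ y ∈ l.drop k, l.getD (k-1) 0 < y := by
      intro y hy
      obtain ⟨p, hp2, rfl⟩ := List.mem_iff_getElem.mp hy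
      rw [List.getElem_drop, hget]
      exact List.pairwise_iff_getElem.mp hp (k-1) (k+p) (by omega) (by simp at hp2; omega) (by omega)
    rw [hdef]
    refine ⟨?_, ⟨?_, ?_, ?_, tw, dw⟩, ?_, fun x => ?_, fun x => ?_⟩

    · simp [keysT, tk, dk]
    · rw [tk]; exact hbl
    · rw [dk]; exact hbr
    · simp only [allB, ta, da]; rfl
    · simp only [allB, ta, da]; rfl
    · rw [bLt_node, tlt, dlt]; rfl
    · rw [bGt_node, tgt, dgt]; rfl
termination_by vs.length
decreasing_by
  · simp; omega
  · simp; omega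

-- ---- A-side loop characterisation ----

def stA (arr : List Int) (i : Nat) : List Int × List Int :=
  (List.range' 1 i).foldl (fun st k => innerA arr k st)
    (List.replicate arr.length 1, List.replicate arr.length (-1))

def Dp (arr : List Int) (j : Nat) : Int := (stA arr j).1.getD j 0

def valleyB (arr : List Int) (j : Nat) : Bool :=
  j == 0 || decide (arr.getD (j-1) 0 > arr.getD j 0)

def peakB (arr : List Int) (j : Nat) : Bool :=
  j == 0 || decide (arr.getD (j-1) 0 < arr.getD j 0)

def condA (arr : List Int) (i j : Nat) : Bool :=
  (decide (arr.getD j 0 < arr.getD i 0) && (j == 0 || decide (arr.getD (j-1) 0 > arr.getD j 0))) ||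
  (decide (arr.getD j 0 > arr.getD i 0) && (j == 0 || decide (arr.getD (j-1) 0 < arr.getD j 0)))

def vC (arr : List Int) (m : Nat) (x : Int) : List (Int × Int) :=
  (List.range m).filterMap (fun j =>
    if valleyB arr j && decide (arr.getD j 0 < x) then some (Dp arr j, (j : Int)) else none)

def pC (arr : List Int) (m : Nat) (x : Int) : List (Int × Int) :=
  (List.range m).filterMap (fun j =>
    if peakB arr j && decide (x < arr.getD j 0) then some (Dp arr j, (j : Int)) else none)

def qC (arr : List Int) (i : Nat) : List (Int × Int) :=
  (List.range i).filterMap (fun j =>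
    if condA arr i j then some (Dp arr j, (j : Int)) else none)

def applyC (dp pr : List Int) (i : Nat) : Option (Int × Int) → List Int × List Int
  | none => (dp, pr)
  | some (d, j) => (dp.set i (d + 1), pr.set i j)

theorem stA_succ (arr : List Int) (i : Nat) :
    stA arr (i+1) = innerA arr (1 + i) (stA arr i) := by
  unfold stA
  rw [List.range'_1_concat]
  simp [List.foldl_append]

theorem innerA_len (arr : List Int) (i : Nat) (st : List Int × List Int) :
    (innerA arr i st).1.length = st.1.length ∧ (innerA arr i st).2.length = st.2.length := by
  unfold innerA
  generalize List.range i = js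
  induction js generalizing st with
  | nil => exact ⟨rfl, rfl⟩
  | cons j js ih =>
    simp only [List.foldl_cons]
    split
    · refine ⟨?_, ?_⟩
      · rw [(ih _).1]; simp
      · rw [(ih _).2]; simp
    · exact ih st

theorem innerA_untouched (arr : List Int) (i : Nat) (st : List Int × List Int) {j : Nat}
    (hj : j ≠ i) :
    (innerA arr i st).1.getD j 0 = st.1.getD j 0 ∧ (innerA arr i st).2.getD j 0 = st.2.getD j 0 := by
  unfold innerA
  generalize List.range i = js
  induction js generalizing st with
  | nil => exact ⟨rfl, rfl⟩
  | cons j' js ih =>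
    simp only [List.foldl_cons]
    split
    · refine ⟨?_, ?_⟩
      · rw [(ih _).1]; simp [List.getD, List.getElem?_set_ne (by omega : i ≠ j)]
      · rw [(ih _).2]; simp [List.getD, List.getElem?_set_ne (by omega : i ≠ j)]
    · exact ih st

theorem stA_len (arr : List Int) (i : Nat) :
    (stA arr i).1.length = arr.length ∧ (stA arr i).2.length = arr.length := by
  induction i with
  | zero => simp [stA]
  | succ i ih =>
    rw [stA_succ]
    obtain ⟨h1, h2⟩ := innerA_len arr (1 + i) (stA arr i)
    rw [h1, h2]
    exact ih

theorem stA_untouched (arr : List Int) (i : Nat) {p : Nat} (hp : i < p) :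
    (stA arr i).1.getD p 0 = (List.replicate arr.length (1 : Int)).getD p 0 := by
  induction i with
  | zero => rfl
  | succ i ih =>
    rw [stA_succ]
    rw [(innerA_untouched arr (1 + i) (stA arr i) (j := p) (by omega)).1]
    exact ih (by omega)

theorem stA_stab (arr : List Int) (i : Nat) {j : Nat} (hj : j ≤ i) :
    (stA arr i).1.getD j 0 = Dp arr j := by
  induction i with
  | zero =>
    have : j = 0 := by omega
    subst this; rfl
  | succ i ih =>
    rcases Nat.lt_or_ge j (i+1) with h' | h'
    · rw [stA_succ]
      rw [(innerA_untouched arr (1 + i) (stA arr i) (j := j) (by omega)).1]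
      exact ih (by omega)
    · have : j = i + 1 := by omega
      subst this; rfl

theorem innerA_ge1 (arr : List Int) (i : Nat) (st : List Int × List Int)
    (h : ∀ p, p < st.1.length → 1 ≤ st.1.getD p 0) :
    ∀ p, p < (innerA arr i st).1.length → 1 ≤ (innerA arr i st).1.getD p 0 := by
  unfold innerA
  generalize List.range i = js
  induction js generalizing st with
  | nil => exact h
  | cons j js ih =>
    simp only [List.foldl_cons]
    split
    · refine ih _ ?_
      intro p hp
      rcases eq_or_ne p i with rfl | hne
      · have hlen : p < st.1.length := by simpa using hp
        rw [List.getD, List.getElem?_set_self hlen]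
        simp only [Option.getD_some]
        rcases Nat.lt_or_ge j st.1.length with hj | hj
        · have := h j hj; omega
        · rw [List.getD, List.getElem?_eq_none (by omega)]; simp
      · rw [List.getD, List.getElem?_set_ne (by omega : i ≠ p)]
        exact h p (by simpa using hp)
    · exact ih st h

theorem stA_ge1 (arr : List Int) (i : Nat) : ∀ p, p < arr.length → 1 ≤ (stA arr i).1.getD p 0 := by
  induction i with
  | zero => intro p hp; simp [stA, List.getD, List.getElem?_replicate, hp]
  | succ i ih =>
    intro p hp
    rw [stA_succ]
    refine innerA_ge1 arr (1+i) (stA arr i) ?_ p ?_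
    · intro q hq
      rw [(stA_len arr i).1] at hq
      exact ih q hq
    · rw [(innerA_len arr (1+i) (stA arr i)).1, (stA_len arr i).1]
      exact hp

theorem Dp_ge1 (arr : List Int) {j : Nat} (hj : j < arr.length) : 1 ≤ Dp arr j := by
  exact stA_ge1 arr j j hj

theorem AscanGen (arr : List Int) (i : Nat) (dp0 pr0 : List Int)
    (hl1 : i < dp0.length) (hl2 : i < pr0.length)
    (hdp : ∀ j, j < i → dp0.getD j 0 = Dp arr j)
    (hinit : dp0.getD i 0 = 1)
    (hge : ∀ j, j < i → 1 ≤ Dp arr j) :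
    ∀ (js : List Nat) (c : Option (Int × Int)),
      (∀ j ∈ js, j < i) → js.Pairwise (· < ·) →
      (∀ j ∈ js, ∀ d j', c = some (d, j') → j' < (j : Int)) →
      js.foldl (fun st j =>
        if ((decide (arr.getD j 0 < arr.getD i 0) && (j == 0 || decide (arr.getD (j-1) 0 > arr.getD j 0))) ||
            (decide (arr.getD j 0 > arr.getD i 0) && (j == 0 || decide (arr.getD (j-1) 0 < arr.getD j 0)))) &&
           decide (st.1.getD j 0 + 1 > st.1.getD i 0)
        then (st.1.set i (st.1.getD j 0 + 1), st.2.set i (Int.ofNat j))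
        else st) (applyC dp0 pr0 i c)
      = applyC dp0 pr0 i
          (js.foldl (fun b j => if condA arr i j then lsCombine b (some (Dp arr j, (j : Int))) else b) c) := by
  intro js
  induction js with
  | nil => intro c _ _ _; rfl
  | cons j js ih =>
    intro c hjs hpw hc
    have hji : j < i := hjs j (by simp)
    have hpw' : js.Pairwise (· < ·) := hpw.of_cons
    have hjlt : ∀ j2 ∈ js, j < j2 := fun j2 h2 => (List.pairwise_cons.mp hpw).1 j2 h2
    simp only [List.foldl_cons]
    by_cases hA : condA arr i j = true
    · have hAu := hA
      unfold condA at hAu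
      rcases c with _ | ⟨d, j'⟩
      · rw [show applyC dp0 pr0 i none = (dp0, pr0) from rfl]
        rw [if_pos (by
          simp only [hAu, Bool.true_and, decide_eq_true_eq]
          rw [hdp j hji, hinit]
          have := hge j hji; omega)]
        have hstate : (dp0.set i (dp0.getD j 0 + 1), pr0.set i (Int.ofNat j))
            = applyC dp0 pr0 i (some (Dp arr j, (j : Int))) := by
          simp only [applyC, hdp j hji]
          rfl
        rw [hstate, ih (some (Dp arr j, (j : Int))) (fun x hx => hjs x (by simp [hx])) hpw'
          (fun j2 h2 d2 j2' he => by
            cases he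
            exact_mod_cast Int.ofNat_lt.mpr (hjlt j2 h2))]
        rw [if_pos hA]
        simp only [applyC]
        rfl
      · rw [show applyC dp0 pr0 i (some (d, j')) = (dp0.set i (d + 1), pr0.set i j') from rfl]
        have hj' : j' < (j : Int) := hc j (by simp) d j' rfl
        have e1 : (dp0.set i (d + 1)).getD j 0 = Dp arr j := by
          rw [List.getD, List.getElem?_set_ne (by omega : i ≠ j), ← List.getD, hdp j hji]
        have e2 : (dp0.set i (d + 1)).getD i 0 = d + 1 := by
          rw [List.getD, List.getElem?_set_self hl1]
          rfl
        by_cases hbeat : d < Dp arr j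
        · rw [if_pos (by
            simp only [hAu, Bool.true_and, decide_eq_true_eq, e1, e2]
            omega)]
          have hstate : ((dp0.set i (d + 1)).set i ((dp0.set i (d + 1)).getD j 0 + 1),
              (pr0.set i j').set i (Int.ofNat j))
              = applyC dp0 pr0 i (some (Dp arr j, (j : Int))) := by
            simp only [applyC, e1, List.set_set]
            rfl
          rw [hstate, ih (some (Dp arr j, (j : Int))) (fun x hx => hjs x (by simp [hx])) hpw'
            (fun j2 h2 d2 j2' he => by
              cases he
              exact_mod_cast Int.ofNat_lt.mpr (hjlt j2 h2))]
          rw [if_pos hA]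
          have hcomb : lsCombine (some (d, j')) (some (Dp arr j, (j : Int))) = some (Dp arr j, (j : Int)) := by
            simp only [lsCombine]
            rw [if_pos (by simp; omega)]
          rw [hcomb]
        · rw [if_neg (by
            simp only [hAu, Bool.true_and, decide_eq_true_eq, e1, e2]
            omega)]
          have hI := ih (some (d, j')) (fun x hx => hjs x (by simp [hx])) hpw'
            (fun j2 h2 d2 j2' he => by
              cases he
              exact lt_trans hj' (by exact_mod_cast Int.ofNat_lt.mpr (hjlt j2 h2)))
          rw [show applyC dp0 pr0 i (some (d, j')) = (dp0.set i (d + 1), pr0.set i j') from rfl] at hI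
          rw [hI]
          rw [if_pos hA]
          have hcomb : lsCombine (some (d, j')) (some (Dp arr j, (j : Int))) = some (d, j') := by
            simp only [lsCombine]
            rw [if_neg (by simp; omega)]
          rw [hcomb]
    · have hA' : condA arr i j = false := by simpa using hA
      have hAu := hA'
      unfold condA at hAu
      rw [if_neg (by rw [hAu]; simp)]
      rw [ih c (fun x hx => hjs x (by simp [hx])) hpw'
        (fun j2 h2 d2 j2' he => hc j2 (by simp [h2]) d2 j2' he)]
      rw [if_neg (by rw [hA']; simp)]

-- ---- B-side loop invariant ----

def valsL (arr : List Int) : List Int :=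
  PySem.List.sorted (PySem.Set.ofList arr) (fun x => x) false

def stB (arr : List Int) (i : Nat) : (List Int × List Int) × (LSTree × LSTree) :=
  (List.range (i+1)).foldl (stepB arr)
    ((List.replicate arr.length 1, List.replicate arr.length (-1)),
     (lsBuild (valsL arr), lsBuild (valsL arr)))

def InvB (arr : List Int) (i : Nat) : Prop :=
  (stB arr i).1 = stA arr i ∧
  wfT (stB arr i).2.1 ∧ wfT (stB arr i).2.2 ∧
  keysT (stB arr i).2.1 = valsL arr ∧ keysT (stB arr i).2.2 = valsL arr ∧
  (∀ x, bLt (stB arr i).2.1 x = bestOf (vC arr (i+1) x)) ∧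
  (∀ x, bGt (stB arr i).2.2 x = bestOf (pC arr (i+1) x))

theorem innerA_eq (arr : List Int) (i : Nat) (dp0 pr0 : List Int)
    (hl1 : i < dp0.length) (hl2 : i < pr0.length)
    (hdp : ∀ j, j < i → dp0.getD j 0 = Dp arr j)
    (hinit : dp0.getD i 0 = 1)
    (hge : ∀ j, j < i → 1 ≤ Dp arr j) :
    innerA arr i (dp0, pr0) = applyC dp0 pr0 i (bestOf (qC arr i)) := by
  have h := AscanGen arr i dp0 pr0 hl1 hl2 hdp hinit hge (List.range i) none
    (fun j hj => List.mem_range.mp hj) (List.pairwise_lt_range) (fun j _ d j' he => by cases he)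
  rw [show applyC dp0 pr0 i none = (dp0, pr0) from rfl] at h
  unfold innerA
  rw [h]
  congr 1
  rw [foldl_if_filterMap]
  rfl

theorem stB_succ (arr : List Int) (i : Nat) :
    stB arr (i+1) = stepB arr (stB arr i) (i+1) := by
  unfold stB
  rw [List.range_succ]
  simp [List.foldl_append]

theorem qC_eq (arr : List Int) (i : Nat) :
    qC arr i = (List.range i).filterMap (fun j =>
      if valleyB arr j && decide (arr.getD j 0 < arr.getD i 0) then some (Dp arr j, (j : Int))
      else if peakB arr j && decide (arr.getD i 0 < arr.getD j 0) then some (Dp arr j, (j : Int))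
      else none) := by
  unfold qC
  apply List.filterMap_congr
  intro j _
  unfold condA valleyB peakB
  set a := arr.getD j 0 with ha
  set b := arr.getD i 0 with hb
  by_cases h1 : a < b <;>
    by_cases h2 : b < a <;>
      cases hb3 : (j == 0 || decide (arr.getD (j-1) 0 > a)) <;>
        cases hb4 : (j == 0 || decide (arr.getD (j-1) 0 < a)) <;>
          simp [h1, h2, hb3, hb4] <;> omega

theorem query_eq_qC (arr : List Int) (i : Nat) :
    lsCombine (bestOf (vC arr i (arr.getD i 0))) (bestOf (pC arr i (arr.getD i 0)))
      = bestOf (qC arr i) := by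
  rw [← bestOf_append]
  refine (bestOf_perm ?_).symm
  rw [qC_eq]
  exact filterMap_disjoint_perm (List.range i)
    (fun j => valleyB arr j && decide (arr.getD j 0 < arr.getD i 0))
    (fun j => peakB arr j && decide (arr.getD i 0 < arr.getD j 0))
    (fun j => (Dp arr j, (j : Int)))
    (fun j _ h => by
      obtain ⟨h1, h2⟩ := h
      simp only [Bool.and_eq_true, decide_eq_true_eq] at h1 h2
      omega)

theorem vC_succ (arr : List Int) (m : Nat) (x : Int) :
    vC arr (m+1) x = vC arr m x ++
      (if valleyB arr m && decide (arr.getD m 0 < x) then [(Dp arr m, (m : Int))] else []) := by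
  unfold vC
  rw [List.range_succ, List.filterMap_append]
  congr 1
  by_cases h : (valleyB arr m && decide (arr.getD m 0 < x)) = true
  · simp only [Bool.and_eq_true, decide_eq_true_eq, List.getD] at h
    simp [List.filterMap_cons, List.getD, h]
  · simp only [Bool.and_eq_true, decide_eq_true_eq, List.getD] at h
    simp [List.filterMap_cons, List.getD, h]

theorem pC_succ (arr : List Int) (m : Nat) (x : Int) :
    pC arr (m+1) x = pC arr m x ++
      (if peakB arr m && decide (x < arr.getD m 0) then [(Dp arr m, (m : Int))] else []) := by
  unfold pC
  rw [List.range_succ, List.filterMap_append]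
  congr 1
  by_cases h : (peakB arr m && decide (x < arr.getD m 0)) = true
  · simp only [Bool.and_eq_true, decide_eq_true_eq, List.getD] at h
    simp [List.filterMap_cons, List.getD, h]
  · simp only [Bool.and_eq_true, decide_eq_true_eq, List.getD] at h
    simp [List.filterMap_cons, List.getD, h]

theorem stepB_form (arr : List Int) (st : (List Int × List Int) × (LSTree × LSTree)) (i : Nat) :
    stepB arr st (i+1) =
      (applyC st.1.1 st.1.2 (i+1)
        (lsCombine (lsQueryLt st.2.1 (arr.getD (i+1) 0)) (lsQueryGt st.2.2 (arr.getD (i+1) 0))),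
       ((if valleyB arr (i+1)
         then lsUpdate st.2.1 (arr.getD (i+1) 0)
                ((applyC st.1.1 st.1.2 (i+1)
                  (lsCombine (lsQueryLt st.2.1 (arr.getD (i+1) 0))
                    (lsQueryGt st.2.2 (arr.getD (i+1) 0)))).1.getD (i+1) 0, Int.ofNat (i+1))
         else st.2.1),
        (if peakB arr (i+1)
         then lsUpdate st.2.2 (arr.getD (i+1) 0)
                ((applyC st.1.1 st.1.2 (i+1)
                  (lsCombine (lsQueryLt st.2.1 (arr.getD (i+1) 0))
                    (lsQueryGt st.2.2 (arr.getD (i+1) 0)))).1.getD (i+1) 0, Int.ofNat (i+1))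
         else st.2.2))) := by
  have hbeq : ((i+1) == 0) = false := by simp
  unfold stepB valleyB peakB
  rw [if_neg (Nat.succ_ne_zero i)]
  simp only [hbeq, Bool.false_or, Nat.add_sub_cancel]
  rcases hq : lsCombine (lsQueryLt st.2.1 (arr.getD (i+1) 0)) (lsQueryGt st.2.2 (arr.getD (i+1) 0))
    with _ | ⟨d, j⟩ <;> simp only [applyC]

theorem mainInv (arr : List Int) : ∀ i, i < arr.length → InvB arr i := by
  have hmem : ∀ k, k < arr.length → arr.getD k 0 ∈ valsL arr := by
    intro k hk
    have hm : arr.getD k 0 ∈ arr := by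
      rw [List.getD_eq_getElem _ _ hk]
      exact List.getElem_mem hk
    exact (PySem.List.mem_sorted _ _ _ _).mpr ((PySem.Set.mem_ofList _ _).mpr hm)
  intro i
  induction i with
  | zero =>
    intro h0
    have hne : valsL arr ≠ [] := List.ne_nil_of_mem (hmem 0 h0)
    obtain ⟨bk, bw, ba, blt, bgt⟩ :=
      lsBuild_props (valsL arr) (PySem.List.sorted_ofList_pairwise_lt arr) hne
    have hget1 : (List.replicate arr.length (1:Int)).getD 0 0 = 1 := by
      simp [List.getD, List.getElem?_replicate, h0]
    have hDp0 : Dp arr 0 = 1 := hget1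
    have hstB : stB arr 0 =
        ((List.replicate arr.length 1, List.replicate arr.length (-1)),
         (lsUpdate (lsBuild (valsL arr)) (arr.getD 0 0) (1, Int.ofNat 0),
          lsUpdate (lsBuild (valsL arr)) (arr.getD 0 0) (1, Int.ofNat 0))) := by
      show stepB arr _ 0 = _
      unfold stepB
      simp [hget1]
      rw [show ((List.replicate arr.length (1:Int))[0]?.getD 0) = 1 from hget1]
    obtain ⟨uk, uw, ua, ult, ugt⟩ := lsUpdate_props bw (v := arr.getD 0 0)
      (by rw [bk]; exact hmem 0 h0) (1, Int.ofNat 0)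
    refine ⟨by rw [hstB]; rfl, ?_, ?_, ?_, ?_, ?_, ?_⟩ <;> rw [hstB]
    · exact uw
    · exact uw
    · rw [uk]; exact bk
    · rw [uk]; exact bk
    · intro x
      rw [ult x, blt x]
      rw [vC_succ]
      have hvB0 : valleyB arr 0 = true := rfl
      by_cases hx : arr.getD 0 0 < x
      · rw [if_pos hx]
        simp only [hvB0, hDp0, Bool.true_and, decide_eq_true hx, if_pos]
        rfl
      · rw [if_neg hx]
        simp only [hvB0, hDp0, Bool.true_and, decide_eq_false hx, Bool.false_eq_true, if_false]
        rfl
    · intro x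
      rw [ugt x, bgt x]
      rw [pC_succ]
      have hpB0 : peakB arr 0 = true := rfl
      by_cases hx : x < arr.getD 0 0
      · rw [if_pos hx]
        simp only [hpB0, hDp0, Bool.true_and, decide_eq_true hx, if_pos]
        rfl
      · rw [if_neg hx]
        simp only [hpB0, hDp0, Bool.true_and, decide_eq_false hx, Bool.false_eq_true, if_false]
        rfl
  | succ i ih =>
    intro hi1
    have hin : i < arr.length := by omega
    obtain ⟨inv1, invwV, invwP, invkV, invkP, invLt, invGt⟩ := ih hin
    have ha' : arr.getD (i+1) 0 ∈ valsL arr := hmem (i+1) hi1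
    -- the combined query is the best qualifying candidate
    have hq : lsCombine (lsQueryLt (stB arr i).2.1 (arr.getD (i+1) 0))
        (lsQueryGt (stB arr i).2.2 (arr.getD (i+1) 0)) = bestOf (qC arr (i+1)) := by
      rw [lsQueryLt_eq_bLt invwV, lsQueryGt_eq_bGt invwP, invLt, invGt, query_eq_qC]
    -- the A-side step is the same update
    have hA1 : stA arr (i+1) =
        applyC (stA arr i).1 (stA arr i).2 (i+1) (bestOf (qC arr (i+1))) := by
      rw [stA_succ, Nat.add_comm 1 i]
      rw [show stA arr i = ((stA arr i).1, (stA arr i).2) from rfl]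
      exact innerA_eq arr (i+1) (stA arr i).1 (stA arr i).2
        (by rw [(stA_len arr i).1]; exact hi1)
        (by rw [(stA_len arr i).2]; exact hi1)
        (fun j hj => stA_stab arr i (by omega))
        (by rw [stA_untouched arr i (by omega)]
            simp [List.getD, List.getElem?_replicate, hi1])
        (fun j hj => Dp_ge1 arr (by omega))
    have hDpS : (applyC (stA arr i).1 (stA arr i).2 (i+1)
        (bestOf (qC arr (i+1)))).1.getD (i+1) 0 = Dp arr (i+1) := by
      rw [← hA1]; rfl
    unfold InvB
    rw [stB_succ, stepB_form]
    rw [show (stB arr i).1.1 = (stA arr i).1 from by rw [inv1]]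
    rw [show (stB arr i).1.2 = (stA arr i).2 from by rw [inv1]]
    rw [hq, hDpS]
    obtain ⟨ukV, uwV, uaV, ultV, ugtV⟩ :=
      lsUpdate_props invwV (v := arr.getD (i+1) 0) (by rw [invkV]; exact ha')
        (Dp arr (i+1), Int.ofNat (i+1))
    obtain ⟨ukP, uwP, uaP, ultP, ugtP⟩ :=
      lsUpdate_props invwP (v := arr.getD (i+1) 0) (by rw [invkP]; exact ha')
        (Dp arr (i+1), Int.ofNat (i+1))
    refine ⟨hA1.symm, ?_, ?_, ?_, ?_, ?_, ?_⟩
    · by_cases hv : valleyB arr (i+1) = true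
      · rw [if_pos hv]; exact uwV
      · rw [if_neg hv]; exact invwV
    · by_cases hp : peakB arr (i+1) = true
      · rw [if_pos hp]; exact uwP
      · rw [if_neg hp]; exact invwP
    · by_cases hv : valleyB arr (i+1) = true
      · rw [if_pos hv, ukV]; exact invkV
      · rw [if_neg hv]; exact invkV
    · by_cases hp : peakB arr (i+1) = true
      · rw [if_pos hp, ukP]; exact invkP
      · rw [if_neg hp]; exact invkP
    · intro x
      rw [vC_succ]
      by_cases hv : valleyB arr (i+1) = true
      · rw [if_pos hv]
        rw [ultV x, invLt x]
        simp only [hv, Bool.true_and]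
        by_cases hx : arr.getD (i+1) 0 < x
        · rw [if_pos hx]
          simp only [decide_eq_true hx, if_pos]
          rw [bestOf_append]
          rfl
        · rw [if_neg hx]
          simp only [decide_eq_false hx, Bool.false_eq_true, if_false, List.append_nil]
      · rw [if_neg hv]
        rw [invLt x]
        simp only [(by simpa using hv : valleyB arr (i+1) = false), Bool.false_and,
          Bool.false_eq_true, if_false, List.append_nil]
    · intro x
      rw [pC_succ]
      by_cases hp : peakB arr (i+1) = true
      · rw [if_pos hp]
        rw [ugtP x, invGt x]
        simp only [hp, Bool.true_and]
        by_cases hx : x < arr.getD (i+1) 0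
        · rw [if_pos hx]
          simp only [decide_eq_true hx, if_pos]
          rw [bestOf_append]
          rfl
        · rw [if_neg hx]
          simp only [decide_eq_false hx, Bool.false_eq_true, if_false, List.append_nil]
      · rw [if_neg hp]
        rw [invGt x]
        simp only [(by simpa using hp : peakB arr (i+1) = false), Bool.false_and,
          Bool.false_eq_true, if_false, List.append_nil]

-- ===== VERDICT (by name: the statement is the Claim_ definition above) =====
theorem long_sub_spec : Claim_equal_long_sub := by
  intro arr _
  unfold Spec_long_sub long_sub long_sub_alt
  dsimp only
  by_cases h0 : arr.length = 0
  · rw [if_pos h0, if_pos h0]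
  · rw [if_neg h0, if_neg h0]
    have hB : (List.range arr.length).foldl (stepB arr)
        ((List.replicate arr.length 1, List.replicate arr.length (-1)),
         (lsBuild (PySem.List.sorted (PySem.Set.ofList arr) (fun x => x) false),
          lsBuild (PySem.List.sorted (PySem.Set.ofList arr) (fun x => x) false)))
        = stB arr (arr.length - 1) := by
      unfold stB valsL
      congr 2
      omega
    rw [hB, (mainInv arr (arr.length - 1) (by omega)).1]
    rfl
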